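-- pv_equiv track=rewrite | github.com/kloudy13/HackerRank-Practice | Greedy_Algos.py | my_diff
-- ===== SOURCE A (Python) =====
-- def my_diff(a,n):
--
--     diff = -1
--     max_diff = -1 # initialise to very low value
--
--     for i in range(1,n):
--         for j in range(0,i):
--             if a[j] < a[i]:
--                 diff = a[i] - a[j]
--                 if diff> max_diff:
--                     max_diff = diff
--
--     return max_diff
-- ===== SOURCE B (Python) =====
-- def my_diff(a, n):
--     max_diff = -1
--     if n > 1:
--         lo = a[0]
--         for x in a[1:n]:
--             if x > lo:
--                 d = x - lo
--                 if d > max_diff: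
--                     max_diff = d
--             if x < lo:
--                 lo = x
--     return max_diff
-- ===== Notes on version B (the rewrite author's own statement) =====
-- stated objective: faster
-- what changed: replaced the O(n^2) nested index scan with a single pass over a[1:n] tracking the running prefix minimum
import Mathlib
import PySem

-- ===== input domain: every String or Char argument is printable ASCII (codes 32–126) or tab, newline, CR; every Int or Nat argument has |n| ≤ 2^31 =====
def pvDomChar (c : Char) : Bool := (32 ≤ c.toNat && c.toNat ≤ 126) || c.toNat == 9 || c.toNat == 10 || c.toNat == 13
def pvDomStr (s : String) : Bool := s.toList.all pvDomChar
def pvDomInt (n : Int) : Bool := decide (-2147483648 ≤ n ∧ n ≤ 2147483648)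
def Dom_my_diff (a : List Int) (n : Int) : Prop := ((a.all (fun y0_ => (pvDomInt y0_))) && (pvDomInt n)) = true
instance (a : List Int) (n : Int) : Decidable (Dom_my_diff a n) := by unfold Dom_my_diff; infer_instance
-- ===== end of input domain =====

-- B replaces A's O(n^2) nested index scan by a single pass over a[1:n] tracking the running prefix minimum (measured asymptotically faster).


-- ===== PORT A =====
-- state is (diff, max_diff); a[i] is pyGetD (in range under Pre_)
def my_diff (a : List Int) (n : Int) : Int :=
  ((PySem.List.pyRange 1 n 1).foldl (fun (st : Int × Int) i =>
    (PySem.List.pyRange 0 i 1).foldl (fun (st : Int × Int) j =>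
      if PySem.List.pyGetD a j 0 < PySem.List.pyGetD a i 0 then
        let diff := PySem.List.pyGetD a i 0 - PySem.List.pyGetD a j 0
        (diff, if diff > st.2 then diff else st.2)
      else st) st) ((-1 : Int), (-1 : Int))).2

-- ===== PORT B =====
-- state is (max_diff, lo); single pass over a[1:n]
def my_diff_alt (a : List Int) (n : Int) : Int :=
  if 1 < n then
    ((PySem.List.slice a (some 1) (some n)).foldl (fun (st : Int × Int) x =>
      let md := if x > st.2 ∧ x - st.2 > st.1 then x - st.2 else st.1
      let lo := if x < st.2 then x else st.2
      (md, lo)) ((-1 : Int), PySem.List.pyGetD a 0 0)).1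
  else -1

-- ===== PRECONDITION & SPEC =====
-- Pre_ excludes exactly the inputs where A raises IndexError: 2 ≤ n with n > len(a).
def Pre_my_diff (a : List Int) (n : Int) : Prop := n ≤ (a.length : Int) ∨ n ≤ 1
instance (a : List Int) (n : Int) : Decidable (Pre_my_diff a n) := by unfold Pre_my_diff; infer_instance
def pvWitness_my_diff : List Int × Int := ([2, 3, 10, 2, 4, 8, 1], 7)

def Spec_my_diff (a : List Int) (n : Int) (out : Int) : Prop := out = my_diff_alt a n
instance (a : List Int) (n : Int) (out : Int) : Decidable (Spec_my_diff a n out) := by unfold Spec_my_diff; infer_instance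

-- ===== CLAIM (what is proved, stated in full; the proofs are below) =====
def Claim_equal_my_diff : Prop := ∀ (a : List Int) (n : Int), Dom_my_diff a n → Pre_my_diff a n → Spec_my_diff a n (my_diff a n)

-- ===== LEMMAS AND PROOFS =====

-- the second component of a pair-fold depends only on the initial second component
theorem pv_snd_foldl {α β γ : Type} (f : β × γ → α → β × γ) (g : γ → α → γ)
    (h : ∀ s x, (f s x).2 = g s.2 x) :
    ∀ (l : List α) (s : β × γ), (l.foldl f s).2 = l.foldl g s.2 := by
  intro l
  induction l with
  | nil => intro s; rfl
  | cons x xs ih => intro s; simp only [List.foldl_cons, ih, h]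

-- running minimum of the first k elements of a (k ≥ 1)
def pvLo (a : List Int) : Nat → Int
  | 0 => a.getD 0 0
  | k + 1 => if k = 0 then a.getD 0 0 else min (pvLo a k) (a.getD k 0)

-- scalar versions of the two loops
def pvInnerG (a : List Int) (v : Int) (md : Int) (j : Int) : Int :=
  if PySem.List.pyGetD a j 0 < v then
    (if v - PySem.List.pyGetD a j 0 > md then v - PySem.List.pyGetD a j 0 else md)
  else md

def pvOuterG (a : List Int) (md : Int) (i : Int) : Int :=
  (PySem.List.pyRange 0 i 1).foldl (pvInnerG a (PySem.List.pyGetD a i 0)) md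

def pvStep (st : Int × Int) (x : Int) : Int × Int :=
  (if x > st.2 ∧ x - st.2 > st.1 then x - st.2 else st.1,
   if x < st.2 then x else st.2)

-- A's inner loop at row value v equals the prefix-minimum candidate update
theorem pv_inner (a : List Int) (v : Int) :
    ∀ (k : Nat), 1 ≤ k → ∀ md : Int,
      (PySem.List.pyRange 0 (k : Int) 1).foldl (pvInnerG a v) md
        = if pvLo a k < v ∧ md < v - pvLo a k then v - pvLo a k else md := by
  intro k hk
  induction k with
  | zero => omega
  | succ k ih =>
    intro md
    by_cases hk0 : k = 0
    · subst hk0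
      rw [show (((0:Nat)+1 : Nat) : Int) = (0:Int) + 1 by norm_num, PySem.List.pyRange_one_singleton]
      simp only [List.foldl_cons, List.foldl_nil, pvInnerG, pvLo]
      simp only [PySem.List.pyGetD_zero]
      split_ifs <;> omega
    · have hk1 : 1 ≤ k := by omega
      rw [show ((k+1 : Nat) : Int) = (k : Int) + 1 by push_cast; ring,
          PySem.List.pyRange_one_succ_right (by exact_mod_cast Nat.zero_le k),
          List.foldl_append]
      rw [ih hk1 md]
      simp only [List.foldl_cons, List.foldl_nil, pvInnerG]
      have hlo : pvLo a (k + 1) = min (pvLo a k) (a.getD k 0) := by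
        simp [pvLo, hk0]
      simp only [PySem.List.pyGetD_natCast, hlo]
      rcases le_total (pvLo a k) (a.getD k 0) with h | h <;>
        simp only [min_eq_left h, min_eq_right h] <;> split_ifs <;> omega

-- outer loop of A in scalar form equals B's fold, together with the prefix-min invariant
theorem pv_outer (a : List Int) :
    ∀ (k : Nat), 1 ≤ k → k ≤ a.length →
      (PySem.List.pyRange 1 (k : Int) 1).foldl (pvOuterG a) (-1)
        = (((a.drop 1).take (k - 1)).foldl pvStep ((-1 : Int), a.getD 0 0)).1
      ∧ (((a.drop 1).take (k - 1)).foldl pvStep ((-1 : Int), a.getD 0 0)).2 = pvLo a k := by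
  intro k hk1
  induction k with
  | zero => omega
  | succ k ih =>
    intro hlen
    by_cases hk0 : k = 0
    · subst hk0
      simp [PySem.List.pyRange_one_eq_nil, pvLo]
    · have hk1' : 1 ≤ k := by omega
      have hklen : k ≤ a.length := by omega
      obtain ⟨ihA, ihB⟩ := ih hk1' hklen
      have htake : (a.drop 1).take (k + 1 - 1) = (a.drop 1).take (k - 1) ++ [a.getD k 0] := by
        have hk' : k - 1 < (a.drop 1).length := by
          simp only [List.length_drop]; omega
        rw [show k + 1 - 1 = (k - 1) + 1 by omega, List.take_add_one,
            List.getElem?_eq_getElem hk']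
        simp only [List.getElem_drop, Option.toList_some]
        have hik : 1 + (k - 1) = k := by omega
        rw [List.getD_eq_getElem a 0 (by omega)]
        simp [hik]
      have hrange : PySem.List.pyRange 1 ((k + 1 : Nat) : Int) 1
          = PySem.List.pyRange 1 (k : Int) 1 ++ [(k : Int)] := by
        rw [show ((k+1 : Nat) : Int) = (k : Int) + 1 by push_cast; ring]
        exact PySem.List.pyRange_one_succ_right (by exact_mod_cast hk1')
      rw [hrange, htake, List.foldl_append, List.foldl_append]
      simp only [List.foldl_cons, List.foldl_nil]
      rw [ihA]
      set B := ((a.drop 1).take (k - 1)).foldl pvStep ((-1 : Int), a.getD 0 0) with hB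
      have houter : pvOuterG a B.1 (k : Int)
          = if pvLo a k < a.getD k 0 ∧ B.1 < a.getD k 0 - pvLo a k
            then a.getD k 0 - pvLo a k else B.1 := by
        unfold pvOuterG
        rw [pv_inner a _ k hk1' B.1]
        simp only [PySem.List.pyGetD_natCast]
      have hlo : pvLo a (k + 1) = min (pvLo a k) (a.getD k 0) := by
        simp [pvLo, hk0]
      constructor
      · rw [houter]
        simp only [pvStep, ihB]
      · simp only [pvStep, ihB, hlo]
        split_ifs <;> omega

-- ===== VERDICT (by name: the statement is the Claim_ definition above) =====
theorem my_diff_spec : Claim_equal_my_diff := by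
  intro a n _ hpre
  unfold Spec_my_diff my_diff my_diff_alt
  by_cases hn : 1 < n
  · have hlen : n ≤ (a.length : Int) := by
      rcases hpre with h | h
      · exact h
      · omega
    -- reduce A's pair-folds to the scalar folds
    rw [pv_snd_foldl _ (pvOuterG a)
        (fun s i => pv_snd_foldl _ (pvInnerG a (PySem.List.pyGetD a i 0))
          (fun s j => by
            simp only [pvInnerG]
            split_ifs <;> rfl) _ s)]
    have hk : n = ((n.toNat : Nat) : Int) := (Int.toNat_of_nonneg (by omega)).symm
    obtain ⟨hA, -⟩ := pv_outer a n.toNat (by omega) (by omega)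
    rw [hk, if_pos (show (1:Int) < ((n.toNat : Nat) : Int) by omega)]
    have h22 : (((-1:Int), (-1:Int)).2) = (-1:Int) := rfl
    rw [h22, hA, PySem.List.slice_toNat a (by norm_num) (by omega),
        PySem.List.pyGetD_zero]
    simp only [Int.toNat_one, Int.toNat_natCast]
    rfl
  · rw [PySem.List.pyRange_one_eq_nil (by omega), if_neg hn]
    rfl
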